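-- pv_equiv track=rewrite | github.com/DRone231/performance-lab | task1/task1.py | circle_mas
-- ===== SOURCE A (Python) =====
-- def circle_mas(n, m):
--     i = 1
--     result = [i]
--     while True:
--         i += m-1
--         i = i % n
--         if i == 0:
--             i = n
--         if i > 1:
--             result.append(i)
--         elif i == 1:
--             break
--     return result
-- ===== SOURCE B (Python) =====
-- def circle_mas(n, m):
--     # closed-form: orbit length L = n // gcd(n, m-1); position k is (1 + k*(m-1)) % n with 0 mapped to n
--     step = (m - 1) % n          # raises ZeroDivisionError for n == 0, like A
--     a, b = step, n
--     while b:
--         a, b = b, a % b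
--     L = n // a
--     out = [1]
--     for k in range(1, L):
--         pos = (1 + k * (m - 1)) % n
--         out.append(n if pos == 0 else pos)
--     return out
-- ===== Notes on version B (the rewrite author's own statement) =====
-- stated objective: alternative
-- what changed: Replaces A's dynamic 'step until back at position 1' while-loop with a precomputed orbit length L = n // gcd(n, m-1) (Euclid) and a closed-form position formula (1 + k*(m-1)) % n emitted for k = 1..L-1.
import Mathlib
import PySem

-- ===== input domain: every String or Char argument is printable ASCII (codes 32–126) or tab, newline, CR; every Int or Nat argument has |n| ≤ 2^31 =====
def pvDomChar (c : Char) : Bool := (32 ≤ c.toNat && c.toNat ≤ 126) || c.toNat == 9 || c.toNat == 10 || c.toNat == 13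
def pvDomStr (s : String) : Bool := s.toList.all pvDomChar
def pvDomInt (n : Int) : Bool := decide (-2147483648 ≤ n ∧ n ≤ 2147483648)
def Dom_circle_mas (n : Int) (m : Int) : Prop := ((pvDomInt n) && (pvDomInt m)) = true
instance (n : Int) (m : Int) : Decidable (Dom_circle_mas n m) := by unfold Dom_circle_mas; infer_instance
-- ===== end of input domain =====

-- B replaces A's dynamic "step until back at 1" while-loop with a precomputed orbit
-- length L = n // gcd(n, m-1) and a closed-form position formula; same cost, different algorithm.


-- ===== PORT A =====
-- A's `while True` loop, with fuel: for n ≥ 1 the loop provably returns to 1 within n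
-- iterations, so fuel n.toNat + 1 never runs out inside Pre_; fuel only totalises the port.
def circleLoopA (n m : Int) : Nat → Int → List Int
  | 0, _ => []
  | fuel + 1, i =>
    let i1 := i + (m - 1)                       -- i += m-1
    let i2 := PySem.Int.mod i1 n                -- i = i % n
    let i3 := if i2 = 0 then n else i2          -- if i == 0: i = n
    if i3 > 1 then i3 :: circleLoopA n m fuel i3      -- if i > 1: result.append(i)
    else if i3 = 1 then []                      -- elif i == 1: break
    else circleLoopA n m fuel i3

def circle_mas (n : Int) (m : Int) : List Int := 1 :: circleLoopA n m (n.toNat + 1) 1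

-- ===== PORT B =====
-- the hand-written Euclid loop of Source B: while b: a, b = b, a % b
def gcdLoopB (a b : Int) : Int :=
  if hb : b = 0 then a else gcdLoopB b (PySem.Int.mod a b)
termination_by b.natAbs
decreasing_by
  rcases lt_trichotomy b 0 with h | h | h
  · have := PySem.Int.mod_neg_bounds (a := a) h; omega
  · exact absurd h hb
  · have h1 := PySem.Int.mod_nonneg (a := a) h
    have h2 := PySem.Int.mod_lt (a := a) h
    omega

def circle_mas_alt (n : Int) (m : Int) : List Int :=
  let step := PySem.Int.mod (m - 1) n
  let g := gcdLoopB step n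
  let L := PySem.Int.floordiv n g
  (PySem.List.pyRange 1 L 1).foldl
    (fun out k =>
      let pos := PySem.Int.mod (1 + k * (m - 1)) n
      out ++ [if pos = 0 then n else pos]) [1]

-- ===== PRECONDITION & SPEC =====
-- Pre_ excludes n ≤ 0: for n = 0 A raises ZeroDivisionError, and for n < 0 A loops forever
-- (the mapped position is never 1), so A returns a value exactly when 1 ≤ n.
def Pre_circle_mas (n : Int) (m : Int) : Prop := 1 ≤ n
instance (n : Int) (m : Int) : Decidable (Pre_circle_mas n m) := by unfold Pre_circle_mas; infer_instance
def pvWitness_circle_mas : Int × Int := (7, 3)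

def Spec_circle_mas (n : Int) (m : Int) (out : List Int) : Prop := out = circle_mas_alt n m
instance (n : Int) (m : Int) (out : List Int) : Decidable (Spec_circle_mas n m out) := by unfold Spec_circle_mas; infer_instance

-- ===== CLAIM (what is proved, stated in full; the proofs are below) =====
def Claim_equal_circle_mas : Prop := ∀ (n : Int) (m : Int), Dom_circle_mas n m → Pre_circle_mas n m → Spec_circle_mas n m (circle_mas n m)

-- ===== LEMMAS AND PROOFS =====

-- the closed-form position after k steps: (1 + k*(m-1)) % n, with 0 mapped to n
def posOf (n m : Int) (k : Nat) : Int :=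
  if PySem.Int.mod (1 + (k : Int) * (m - 1)) n = 0 then n
  else PySem.Int.mod (1 + (k : Int) * (m - 1)) n

lemma gcdLoopB_eq (a b : Int) (ha : 0 ≤ a) (hb0 : 0 ≤ b) : gcdLoopB a b = Int.gcd a b := by
  rw [gcdLoopB]
  split
  · rename_i hb; subst hb; simp [Int.gcd]; exact (abs_of_nonneg ha).symm
  · rename_i hb
    have hbpos : 0 < b := lt_of_le_of_ne hb0 (Ne.symm hb)
    rw [gcdLoopB_eq b (PySem.Int.mod a b) hb0 (PySem.Int.mod_nonneg (a := a) hbpos),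
        PySem.Int.mod_eq_emod_of_pos hbpos, Int.gcd_comm, Int.gcd_emod]
termination_by b.natAbs
decreasing_by
  rcases lt_trichotomy b 0 with h | h | h
  · have := PySem.Int.mod_neg_bounds (a := a) h; omega
  · exact absurd h (by assumption)
  · have h1 := PySem.Int.mod_nonneg (a := a) h
    have h2 := PySem.Int.mod_lt (a := a) h
    omega

lemma posOf_bounds (n m : Int) (hn : 1 ≤ n) (k : Nat) : 1 ≤ posOf n m k ∧ posOf n m k ≤ n := by
  unfold posOf
  have h1 := PySem.Int.mod_nonneg (a := 1 + (k : Int) * (m - 1)) (by omega : (0:Int) < n)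
  have h2 := PySem.Int.mod_lt (a := 1 + (k : Int) * (m - 1)) (by omega : (0:Int) < n)
  split <;> omega

lemma posOf_emod (n m : Int) (hn : 1 ≤ n) (k : Nat) :
    posOf n m k % n = (1 + (k : Int) * (m - 1)) % n := by
  unfold posOf
  rw [PySem.Int.mod_eq_emod_of_pos (by omega)]
  split
  · rename_i h; rw [Int.emod_self, h]
  · exact Int.emod_emod_of_dvd _ dvd_rfl

lemma posOf_step (n m : Int) (hn : 1 ≤ n) (k : Nat) :
    PySem.Int.mod (posOf n m k + (m - 1)) n = PySem.Int.mod (1 + ((k : Int) + 1) * (m - 1)) n := by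
  rw [PySem.Int.mod_eq_emod_of_pos (by omega), PySem.Int.mod_eq_emod_of_pos (by omega)]
  calc (posOf n m k + (m - 1)) % n = (posOf n m k % n + (m - 1)) % n := (Int.emod_add_emod _ _ _).symm
    _ = ((1 + (k : Int) * (m - 1)) % n + (m - 1)) % n := by rw [posOf_emod n m hn k]
    _ = (1 + (k : Int) * (m - 1) + (m - 1)) % n := Int.emod_add_emod _ _ _
    _ = (1 + ((k : Int) + 1) * (m - 1)) % n := by ring_nf

lemma posOf_eq_one_iff (n m : Int) (hn : 1 ≤ n) (k : Nat) :
    posOf n m k = 1 ↔ n ∣ (k : Int) * (m - 1) := by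
  have hdvd : n ∣ (k : Int) * (m - 1) ↔ (1 + (k : Int) * (m - 1)) % n = 1 % n := by
    rw [Int.emod_eq_emod_iff_emod_sub_eq_zero]
    constructor
    · intro h
      rw [← Int.dvd_iff_emod_eq_zero]
      simpa using h
    · intro h
      rw [← Int.dvd_iff_emod_eq_zero] at h
      simpa using h
  unfold posOf
  rw [PySem.Int.mod_eq_emod_of_pos (by omega), hdvd]
  have h1 := Int.emod_nonneg (1 + (k : Int) * (m - 1)) (by omega : n ≠ 0)
  have h2 := Int.emod_lt_of_pos (1 + (k : Int) * (m - 1)) (by omega : (0:Int) < n)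
  rcases eq_or_lt_of_le hn with h | h
  · have hn1 : n = 1 := h.symm
    subst hn1
    simp
  · have hone : (1:Int) % n = 1 := Int.emod_eq_of_lt (by omega) h
    rw [hone]
    split <;> omega

lemma nat_dvd_mul_iff_div_gcd_dvd (N S k : Nat) (hN : 0 < N) :
    N ∣ k * S ↔ N / Nat.gcd S N ∣ k := by
  set g := Nat.gcd S N with hg
  have hgpos : 0 < g := Nat.gcd_pos_of_pos_right _ hN
  have hgS : g ∣ S := Nat.gcd_dvd_left _ _
  have hgN : g ∣ N := Nat.gcd_dvd_right _ _
  constructor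
  · intro h
    have h1 : N / g * g ∣ k * (S / g) * g := by
      rw [Nat.div_mul_cancel hgN, mul_assoc, Nat.div_mul_cancel hgS]
      exact h
    have h2 : N / g ∣ k * (S / g) := (Nat.mul_dvd_mul_iff_right hgpos).1 h1
    exact Nat.Coprime.dvd_of_dvd_mul_right ((Nat.coprime_div_gcd_div_gcd hgpos).symm) h2
  · intro h
    calc N = N / g * g := (Nat.div_mul_cancel hgN).symm
      _ ∣ k * g := Nat.mul_dvd_mul_right h g
      _ ∣ k * S := Nat.mul_dvd_mul_left k hgS

lemma dvd_iff_L (n m : Int) (hn : 1 ≤ n) (k : Nat) :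
    n ∣ (k : Int) * (m - 1) ↔ (n / Int.gcd (m - 1) n : Int) ∣ (k : Int) := by
  have hN : n = ((n.natAbs : Nat) : Int) := by omega
  have hNpos : 0 < n.natAbs := by omega
  have hdiv : (n / Int.gcd (m - 1) n : Int) = ((n.natAbs / Nat.gcd (m - 1).natAbs n.natAbs : Nat) : Int) := by
    rw [Int.gcd]
    conv_lhs => rw [hN]
    exact_mod_cast (Int.natCast_div _ _).symm
  rw [hdiv]
  constructor
  · intro h
    have h1 : n.natAbs ∣ k * (m - 1).natAbs := by
      have := Int.natAbs_dvd_natAbs.2 h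
      rwa [Int.natAbs_mul, Int.natAbs_natCast] at this
    exact_mod_cast (nat_dvd_mul_iff_div_gcd_dvd _ _ _ hNpos).1 h1
  · intro h
    have h2 : n.natAbs / Nat.gcd (m - 1).natAbs n.natAbs ∣ k := by exact_mod_cast h
    have h1 := (nat_dvd_mul_iff_div_gcd_dvd n.natAbs (m - 1).natAbs k hNpos).2 h2
    rw [← Int.natAbs_dvd_natAbs, Int.natAbs_mul, Int.natAbs_natCast]
    exact h1

lemma posOf_zero (n m : Int) (hn : 1 ≤ n) : posOf n m 0 = 1 := by
  unfold posOf
  rw [PySem.Int.mod_eq_emod_of_pos (by omega)]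
  simp only [Nat.cast_zero, zero_mul, add_zero]
  rcases eq_or_lt_of_le hn with h | h
  · have hn1 : n = 1 := h.symm
    subst hn1
    simp
  · rw [Int.emod_eq_of_lt (by omega) h]
    simp

lemma loopA_eq (n m : Int) (hn : 1 ≤ n) (K : Nat) (hK : (K : Int) = n / Int.gcd (m - 1) n) :
    ∀ fuel k, k < K → K ≤ k + fuel →
      circleLoopA n m fuel (posOf n m k) = (List.range' (k + 1) (K - 1 - k)).map (posOf n m) := by
  intro fuel
  induction fuel with
  | zero => intro k hk hf; omega
  | succ f ih =>
    intro k hk hf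
    have hwrap : (if PySem.Int.mod (posOf n m k + (m - 1)) n = 0 then n
        else PySem.Int.mod (posOf n m k + (m - 1)) n) = posOf n m (k + 1) := by
      rw [posOf_step n m hn k]
      unfold posOf
      push_cast
      ring_nf
    rw [circleLoopA]
    simp only [hwrap]
    by_cases hk1 : k + 1 = K
    · have h1 : posOf n m (k + 1) = 1 := by
        rw [posOf_eq_one_iff n m hn (k + 1), dvd_iff_L n m hn (k + 1), ← hK, hk1]
      rw [h1]
      have : K - 1 - k = 0 := by omega
      simp [this]
    · have hlt : k + 1 < K := by omega
      have h1 : posOf n m (k + 1) ≠ 1 := by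
        intro heq
        rw [posOf_eq_one_iff n m hn (k + 1), dvd_iff_L n m hn (k + 1), ← hK] at heq
        have hdvd := heq
        have := Int.le_of_dvd (by exact_mod_cast Nat.succ_pos k) hdvd
        exact absurd (by exact_mod_cast this) (by omega)
      have hb := posOf_bounds n m hn (k + 1)
      have hgt : posOf n m (k + 1) > 1 := by omega
      rw [if_pos hgt, ih (k + 1) hlt (by omega)]
      have hr : K - 1 - k = (K - 1 - (k + 1)) + 1 := by omega
      rw [hr, List.range'_succ, List.map_cons]

theorem circle_mas_spec : Claim_equal_circle_mas := by
  intro n m _ hpre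
  have hn : 1 ≤ n := hpre
  unfold Spec_circle_mas circle_mas circle_mas_alt
  have hgcd : gcdLoopB (PySem.Int.mod (m - 1) n) n = (Int.gcd (m - 1) n : Int) := by
    rw [gcdLoopB_eq _ _ (PySem.Int.mod_nonneg (a := m - 1) (by omega)) (by omega),
        PySem.Int.mod_eq_emod_of_pos (by omega)]
    exact congrArg (fun x : Nat => (x : Int)) (Int.gcd_emod (m - 1) n)
  simp only [hgcd]
  have hgpos : (0 : Int) < (Int.gcd (m - 1) n : Int) := by
    have : Int.gcd (m - 1) n ≠ 0 := by
      simp [Int.gcd_eq_zero_iff]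
      omega
    exact_mod_cast Nat.pos_of_ne_zero this
  rw [PySem.Int.floordiv_eq_ediv_of_pos hgpos]
  set L : Int := n / (Int.gcd (m - 1) n : Int) with hL
  have hgdvd : (Int.gcd (m - 1) n : Int) ∣ n := Int.gcd_dvd_right _ _
  have hgle : (Int.gcd (m - 1) n : Int) ≤ n := Int.le_of_dvd (by omega) hgdvd
  have hL1 : 1 ≤ L := by
    rw [hL]
    rw [Int.le_ediv_iff_mul_le hgpos]
    omega
  have hLn : L ≤ n := Int.ediv_le_self _ (by omega)
  set K : Nat := L.toNat with hKdef
  have hK : (K : Int) = L := by omega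
  -- A side
  have hA : circleLoopA n m (n.toNat + 1) 1 = (List.range' 1 (K - 1)).map (posOf n m) := by
    rw [← posOf_zero n m hn, loopA_eq n m hn K hK (n.toNat + 1) 0 (by omega) (by omega)]
    norm_num
  rw [hA]
  -- B side
  rw [PySem.List.foldl_append_singleton_eq_map, PySem.List.pyRange_one, List.map_map,
      List.range'_eq_map_range, List.map_map]
  have hlen : (L - 1).toNat = K - 1 := by omega
  rw [hlen]
  apply congrArg
  apply List.map_congr_left
  intro k _
  show posOf n m (1 + k) = _
  simp only [Function.comp_apply]
  unfold posOf
  have hcast : (1 : Int) + ((1 + k : Nat) : Int) * (m - 1) = 1 + (1 + (k : Int)) * (m - 1) := by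
    push_cast; ring
  rw [hcast]
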